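-- pv_equiv track=rewrite | github.com/Ydabab/pp1 | 09-Test2/zadanie2.py | f
-- ===== SOURCE A (Python) =====
-- def f(enter):
--     number_of_people = 0
--     for i in enter:
--         if i == "+":
--             number_of_people += 1
--         elif i == "-":
--             number_of_people -= 1
--     return number_of_people
-- ===== SOURCE B (Python) =====
-- def f(enter):
--     def net(s):
--         if len(s) <= 1:
--             if s == "+":
--                 return 1
--             if s == "-":
--                 return -1
--             return 0
--         mid = len(s) // 2
--         return net(s[:mid]) + net(s[mid:])
--     return net(enter)
-- ===== Notes on version B (the rewrite author's own statement) =====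
-- stated objective: alternative
-- what changed: Replaces the linear streaming accumulator with a divide-and-conquer recursion: split the string in half, compute each half's net sign value recursively, and add the two results; correct because the net value is additive over concatenation.
import Mathlib
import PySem

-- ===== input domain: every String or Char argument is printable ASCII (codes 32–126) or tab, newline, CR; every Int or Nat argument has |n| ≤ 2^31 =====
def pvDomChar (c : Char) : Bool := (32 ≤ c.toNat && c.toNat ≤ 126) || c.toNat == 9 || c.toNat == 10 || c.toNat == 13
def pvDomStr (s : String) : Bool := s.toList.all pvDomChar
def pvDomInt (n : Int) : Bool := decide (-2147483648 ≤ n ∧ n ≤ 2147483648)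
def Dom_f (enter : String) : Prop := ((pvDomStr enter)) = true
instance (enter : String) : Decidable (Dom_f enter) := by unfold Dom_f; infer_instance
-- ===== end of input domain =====

-- B replaces A's linear streaming accumulator with a divide-and-conquer recursion (split in half, recurse, add); alternative structure, same O(n) work.


-- ===== PORT A =====
def f (enter : String) : Int :=
  enter.toList.foldl
    (fun number_of_people i =>
      if i = '+' then number_of_people + 1
      else if i = '-' then number_of_people - 1
      else number_of_people) 0

-- ===== PORT B =====
-- net s: if len(s) <= 1 classify the single char, else split at len//2 and add the halves.
def fAltNet (s : List Char) : Int :=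
  if h : s.length ≤ 1 then
    if s = ['+'] then 1
    else if s = ['-'] then -1
    else 0
  else
    let mid := s.length / 2
    fAltNet (s.take mid) + fAltNet (s.drop mid)
termination_by s.length
decreasing_by
  · simp only [List.length_take]
    omega
  · simp only [List.length_drop]
    omega

def f_alt (enter : String) : Int := fAltNet enter.toList

-- ===== PRECONDITION & SPEC =====
def Spec_f (enter : String) (out : Int) : Prop := out = f_alt enter
instance (enter : String) (out : Int) : Decidable (Spec_f enter out) := by unfold Spec_f; infer_instance

-- ===== CLAIM (what is proved, stated in full; the proofs are below) =====
def Claim_equal_f : Prop := ∀ (enter : String), Dom_f enter → Spec_f enter (f enter)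

-- ===== LEMMAS AND PROOFS =====

theorem f_foldl_count (l : List Char) (acc : Int) :
    l.foldl (fun number_of_people i =>
      if i = '+' then number_of_people + 1
      else if i = '-' then number_of_people - 1
      else number_of_people) acc
    = acc + (l.count '+' : Int) - (l.count '-' : Int) := by
  induction l generalizing acc with
  | nil => simp
  | cons c t ih =>
    simp only [List.foldl_cons, List.count_cons, ih]
    by_cases h1 : c = '+'
    · simp [h1]; ring
    · by_cases h2 : c = '-'
      · simp [h1, h2]; ring
      · simp [h1, h2]

theorem fAltNet_count (s : List Char) :
    fAltNet s = (s.count '+' : Int) - (s.count '-' : Int) := by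
  generalize hn : s.length = n
  induction n using Nat.strong_induction_on generalizing s with
  | _ n ih =>
    rw [fAltNet]
    by_cases h : s.length ≤ 1
    · simp only [h, dif_pos]
      match s, h with
      | [], _ => simp
      | [c], _ =>
        by_cases h1 : c = '+'
        · simp [h1]
        · by_cases h2 : c = '-' <;> simp [h1, h2]
    · simp only [h, dif_neg, not_false_iff]
      have hmid1 : (s.take (s.length / 2)).length < n := by
        simp only [List.length_take]; omega
      have hmid2 : (s.drop (s.length / 2)).length < n := by
        simp only [List.length_drop]; omega
      rw [ih _ hmid1 _ rfl, ih _ hmid2 _ rfl]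
      have hsplit := List.take_append_drop (s.length / 2) s
      have hp : s.count '+' = (s.take (s.length / 2)).count '+' + (s.drop (s.length / 2)).count '+' := by
        rw [← List.count_append, hsplit]
      have hm : s.count '-' = (s.take (s.length / 2)).count '-' + (s.drop (s.length / 2)).count '-' := by
        rw [← List.count_append, hsplit]
      rw [hp, hm]; push_cast; ring

-- ===== VERDICT (by name: the statement is the Claim_ definition above) =====
theorem f_spec : Claim_equal_f := by
  intro enter _
  unfold Spec_f f f_alt
  rw [f_foldl_count, fAltNet_count]
  ring
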